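-- pv_equiv track=rewrite | github.com/msexton1519/math_extended | project_euler.py | project_euler97
-- ===== SOURCE A (Python) =====
-- def project_euler97(num_digits):
--     num = 28433
--     power = 1
--     raised = 10 ** num_digits
--     while power <= 7830457:
--         num = (num * 2) % raised
--         power += 1
--     num += 1
--     return num
-- ===== SOURCE B (Python) =====
-- def project_euler97(num_digits):
--     raised = 10 ** num_digits
--     result = 28433 % raised
--     base = 2 % raised
--     e = 7830457
--     while e > 0:
--         if e & 1:
--             result = result * base % raised
--         base = base * base % raised
--         e >>= 1
--     return result + 1
-- ===== Notes on version B (the rewrite author's own statement) =====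
-- stated objective: faster
-- what changed: replaces A's 7,830,457-iteration doubling loop with a hand-written binary square-and-multiply loop over the 23 bits of the exponent
-- outside the precondition, e.g. on project_euler97(-1): A returns 1.099947039410472, B returns 1.0
import Mathlib
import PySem

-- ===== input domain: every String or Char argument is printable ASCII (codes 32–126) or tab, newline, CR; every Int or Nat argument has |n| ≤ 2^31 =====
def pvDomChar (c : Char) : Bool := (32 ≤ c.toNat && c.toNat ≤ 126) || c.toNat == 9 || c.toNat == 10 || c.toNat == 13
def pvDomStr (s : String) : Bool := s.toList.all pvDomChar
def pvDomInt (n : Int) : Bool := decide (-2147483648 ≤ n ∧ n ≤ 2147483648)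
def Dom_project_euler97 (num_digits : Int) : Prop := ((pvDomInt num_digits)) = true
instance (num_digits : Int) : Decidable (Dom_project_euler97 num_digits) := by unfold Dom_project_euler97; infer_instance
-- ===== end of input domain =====

-- B replaces A's 7,830,457-step doubling loop by a hand-written binary square-and-multiply loop
-- over the bits of the exponent; faster (asymptotic: O(log N) vs O(N) modular multiplications).

-- ===== PORT A =====
-- the while loop: power runs 1..7830457, i.e. 7830457 iterations of num := (num * 2) % raised.
-- num and raised are nonnegative throughout and raised > 0, so Python's % here is exactly Nat.mod.
def project_euler97 (num_digits : Int) : Int :=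
  let raised : Nat := 10 ^ num_digits.toNat  -- 10 ** num_digits; exact for num_digits ≥ 0 (Pre_)
  ((List.range 7830457).foldl (fun num _ => (num * 2) % raised) 28433 : Nat) + 1

-- ===== PORT B =====
-- B's while loop: square-and-multiply on the bits of e, shrinking e by e >>= 1 each round
def pe97_sqmul (raised : Int) (e : Nat) (base result : Int) : Int :=
  if e = 0 then result
  else
    pe97_sqmul raised (e / 2) (PySem.Int.mod (base * base) raised)
      (if e % 2 = 1 then PySem.Int.mod (result * base) raised else result)
  termination_by e
  decreasing_by exact Nat.div_lt_self (Nat.pos_of_ne_zero (by assumption)) one_lt_two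

def project_euler97_alt (num_digits : Int) : Int :=
  let raised : Int := 10 ^ num_digits.toNat  -- 10 ** num_digits; exact for num_digits ≥ 0 (Pre_)
  pe97_sqmul raised 7830457 (PySem.Int.mod 2 raised) (PySem.Int.mod 28433 raised) + 1

-- ===== PRECONDITION & SPEC =====
-- Pre_ excludes num_digits < 0: there 10**num_digits is a Python float, so both A and B
-- return floats (not values of the declared int type).
def Pre_project_euler97 (num_digits : Int) : Prop := 0 ≤ num_digits
instance (num_digits : Int) : Decidable (Pre_project_euler97 num_digits) := by unfold Pre_project_euler97; infer_instance
def pvWitness_project_euler97 : Int := (3)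

def Spec_project_euler97 (num_digits : Int) (out : Int) : Prop := out = project_euler97_alt num_digits
instance (num_digits : Int) (out : Int) : Decidable (Spec_project_euler97 num_digits out) := by unfold Spec_project_euler97; infer_instance

-- ===== CLAIM (what is proved, stated in full; the proofs are below) =====
def Claim_equal_project_euler97 : Prop := ∀ (num_digits : Int), Dom_project_euler97 num_digits → Pre_project_euler97 num_digits → Spec_project_euler97 num_digits (project_euler97 num_digits)

-- ===== LEMMAS AND PROOFS =====

-- (a % r)^n ≡ a^n mod r
theorem pe97_pow_emod (a r : Int) (n : Nat) : (a % r) ^ n % r = a ^ n % r :=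
  Int.ModEq.pow n (Int.emod_emod_of_dvd a dvd_rfl)

-- A's loop computes n * 2^(i+1) mod r (Nat arithmetic, r > 0)
theorem pe97_loop_eq (r : Nat) :
    ∀ (i : Nat) (n : Nat),
      (List.range (i + 1)).foldl (fun num _ => (num * 2) % r) n = (n * 2 ^ (i + 1)) % r := by
  intro i
  induction i with
  | zero =>
    intro n
    simp [List.range_succ, pow_one]
  | succ j ih =>
    intro n
    rw [List.range_succ, List.foldl_append, ih, List.foldl_cons, List.foldl_nil,
      Nat.mul_mod, Nat.mod_mod_of_dvd _ dvd_rfl, ← Nat.mul_mod]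
    ring_nf

-- B's loop computes a * b^e mod r, given a already reduced (for a positive modulus)
theorem pe97_sqmul_eq (r : Int) (hr : 0 < r) :
    ∀ (e : Nat) (b a : Int), a % r = a → pe97_sqmul r e b a = (a * b ^ e) % r := by
  intro e
  induction e using Nat.strong_induction_on with
  | _ e ih =>
    intro b a ha
    rw [pe97_sqmul]
    by_cases he : e = 0
    · simp [he, ha]
    · simp only [he, if_false]
      rw [ih (e / 2) (Nat.div_lt_self (Nat.pos_of_ne_zero he) one_lt_two)]
      · rw [PySem.Int.mod_eq_emod_of_pos hr]
        have hsplit : e = 2 * (e / 2) + e % 2 := (Nat.div_add_mod' e 2).symm ▸ by omega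
        by_cases hodd : e % 2 = 1
        · simp only [hodd, if_true, PySem.Int.mod_eq_emod_of_pos hr]
          conv_rhs => rw [hsplit, hodd]
          rw [pow_add, pow_mul, pow_one]
          rw [Int.mul_emod (a * b % r), Int.emod_emod_of_dvd _ dvd_rfl,
            pe97_pow_emod, ← Int.mul_emod]
          ring_nf
        · have h0 : e % 2 = 0 := by omega
          simp only [hodd, if_false, PySem.Int.mod_eq_emod_of_pos hr]
          conv_rhs => rw [hsplit, h0]
          rw [Nat.add_zero, pow_mul]
          rw [Int.mul_emod a, pe97_pow_emod, ← Int.mul_emod]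
          ring_nf
      · by_cases hodd : e % 2 = 1 <;>
          simp [hodd, PySem.Int.mod_eq_emod_of_pos hr, Int.emod_emod_of_dvd _ dvd_rfl, ha]

theorem project_euler97_spec' (num_digits : Int) :
    project_euler97 num_digits = project_euler97_alt num_digits := by
  have hr : (0 : Int) < 10 ^ num_digits.toNat := by positivity
  simp only [project_euler97, project_euler97_alt]
  rw [show (7830457 : Nat) = 7830456 + 1 from rfl, pe97_loop_eq _]
  have hcast : (((28433 * 2 ^ (7830456 + 1)) % 10 ^ num_digits.toNat : Nat) : Int)
      = (28433 * 2 ^ (7830456 + 1)) % (10 ^ num_digits.toNat : Int) := by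
    push_cast
    ring_nf
  rw [hcast]
  rw [pe97_sqmul_eq _ hr _ _ _ (by rw [PySem.Int.mod_eq_emod_of_pos hr, Int.emod_emod_of_dvd _ dvd_rfl])]
  rw [PySem.Int.mod_eq_emod_of_pos hr, PySem.Int.mod_eq_emod_of_pos hr]
  conv_rhs => rw [Int.mul_emod, Int.emod_emod_of_dvd _ dvd_rfl, pe97_pow_emod, ← Int.mul_emod]

-- ===== VERDICT (by name: the statement is the Claim_ definition above) =====
theorem project_euler97_spec : Claim_equal_project_euler97 := by
  intro d _ _
  exact project_euler97_spec' d
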